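-- pv_equiv track=rewrite | github.com/miliar/Code_Jam_Webscraper | solutions_python/solutions_year14_round4_nr1/205.py | solve
-- ===== SOURCE A (Python) =====
-- def solve(x, files):
--     big = []
--     small = []
--     for f in files:
--         if f > x // 2:
--             big.append(f)
--         else:
--             small.append(f)
--
--     big.sort(reverse=True)
--     small.sort()
--
--     pih = 0
--     bi = 0
--     si = 0
--     while bi < len(big) and si < len(small):
--         if big[bi] + small[si] <= x:
--             pih += 1
--             bi += 1
--             si += 1
--         else:
--             bi += 1
--
--     return len(big) + ((len(small) - pih) + 1) // 2
-- ===== SOURCE B (Python) =====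
-- def solve(x, files):
--     s = sorted(files)
--     lo, hi = 0, len(s) - 1
--     packages = 0
--     while lo <= hi:
--         packages += 1
--         if s[lo] + s[hi] <= x:
--             lo += 1
--         hi -= 1
--     return packages
-- ===== Notes on version B (the rewrite author's own statement) =====
-- stated objective: simpler
-- what changed: Replaces the big/small partition with two oppositely sorted lists, an index-matching loop and a leftover-ceiling formula by one ascending sort of a copy and a single two-pointer 'boats' sweep that counts packages directly.
import Mathlib
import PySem

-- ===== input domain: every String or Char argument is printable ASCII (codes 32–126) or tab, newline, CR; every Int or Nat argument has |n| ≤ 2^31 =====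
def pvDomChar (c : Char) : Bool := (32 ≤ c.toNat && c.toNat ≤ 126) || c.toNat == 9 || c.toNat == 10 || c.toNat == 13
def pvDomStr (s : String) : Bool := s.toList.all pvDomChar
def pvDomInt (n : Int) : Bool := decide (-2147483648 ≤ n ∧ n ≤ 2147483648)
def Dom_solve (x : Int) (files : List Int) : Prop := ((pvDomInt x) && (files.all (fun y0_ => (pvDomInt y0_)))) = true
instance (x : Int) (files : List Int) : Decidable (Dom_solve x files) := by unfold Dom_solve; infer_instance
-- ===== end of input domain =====

-- B replaces A's big/small partition + two opposite sorts + matching loop + leftover-ceiling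
-- formula by one ascending sort of a copy and a single two-pointer sweep (simpler; same cost class).
-- A only sorts its own local lists, so return-value equivalence is full equivalence.

-- ===== PORT A =====
-- the for-loop building big / small (appends, in order)
def solvePart (x : Int) (files : List Int) : List Int × List Int :=
  files.foldl (fun p f =>
    if f > PySem.Int.floordiv x 2 then (p.1 ++ [f], p.2) else (p.1, p.2 ++ [f])) ([], [])

-- the while-loop over indices bi, si (both lists already sorted); returns the final pih
def solveLoop (x : Int) (big small : List Int) (pih : Int) (bi si : Nat) : Int :=
  if h : bi < big.length ∧ si < small.length then
    if big.getD bi 0 + small.getD si 0 ≤ x then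
      solveLoop x big small (pih + 1) (bi + 1) (si + 1)
    else
      solveLoop x big small pih (bi + 1) si
  else pih
termination_by big.length - bi
decreasing_by all_goals omega

def solve (x : Int) (files : List Int) : Int :=
  let p := solvePart x files
  let big := PySem.List.sorted p.1 (fun v => v) true
  let small := PySem.List.sorted p.2 (fun v => v) false
  let pih := solveLoop x big small 0 0 0
  PySem.List.len big + PySem.Int.floordiv (PySem.List.len small - pih + 1) 2

-- ===== PORT B =====
-- the while-loop: lo/hi two-pointer sweep counting packages
def solveAltLoop (x : Int) (s : List Int) (lo hi packages : Int) : Int :=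
  if h : lo ≤ hi then
    let packages := packages + 1
    if PySem.List.pyGetD s lo 0 + PySem.List.pyGetD s hi 0 ≤ x then
      solveAltLoop x s (lo + 1) (hi - 1) packages
    else
      solveAltLoop x s lo (hi - 1) packages
  else packages
termination_by (hi - lo + 1).toNat
decreasing_by all_goals omega

def solve_alt (x : Int) (files : List Int) : Int :=
  let s := PySem.List.sorted files (fun v => v) false
  solveAltLoop x s 0 (PySem.List.len s - 1) 0

-- ===== PRECONDITION & SPEC =====
def Spec_solve (x : Int) (files : List Int) (out : Int) : Prop := out = solve_alt x files
instance (x : Int) (files : List Int) (out : Int) : Decidable (Spec_solve x files out) := by unfold Spec_solve; infer_instance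

-- ===== CLAIM (what is proved, stated in full; the proofs are below) =====
def Claim_equal_solve : Prop := ∀ (x : Int) (files : List Int), Dom_solve x files → Spec_solve x files (solve x files)

-- ===== LEMMAS AND PROOFS =====

-- the partition fold is the pair of filters
lemma solvePart_go (q : Int) :
    ∀ (l b s : List Int),
      l.foldl (fun p f =>
        if f > q then (p.1 ++ [f], p.2) else (p.1, p.2 ++ [f])) (b, s)
      = (b ++ l.filter (fun f => decide (q < f)),
         s ++ l.filter (fun f => !decide (q < f))) := by
  intro l
  induction l with
  | nil => intro b s; simp
  | cons f t ih =>
    intro b s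
    by_cases h : q < f
    · simp [h, ih]
    · simp [h, ih]

-- reading s = sa ++ ba at an index inside the small prefix
lemma getS_small (sa ba : List Int) (si : Nat) (h : si < sa.length) :
    PySem.List.pyGetD (sa ++ ba) (si : Int) 0 = sa.getD si 0 := by
  rw [PySem.List.pyGetD_eq_getElem _ _ (by positivity) (by simp; omega)]
  simp only [Int.toNat_natCast]
  rw [List.getElem_append_left h, List.getD_eq_getElem _ _ h]

lemma getLow (sa ba : List Int) (lo : Int) (h0 : 0 ≤ lo) (h : lo < (sa.length : Int)) :
    PySem.List.pyGetD (sa ++ ba) lo 0 = sa[lo.toNat]'(by omega) := by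
  rw [PySem.List.pyGetD_eq_getElem _ _ h0 (by simp; omega)]
  rw [List.getElem_append_left (by omega)]

-- reading s = sa ++ ba.reverse at hi = |sa| + |ba| - 1 - bi is ba[bi]
lemma getS_big (sa ba : List Int) (bi : Nat) (h : bi < ba.length) :
    PySem.List.pyGetD (sa ++ ba.reverse) ((sa.length : Int) + ba.length - 1 - bi) 0
      = ba.getD bi 0 := by
  have e : ((sa.length : Int) + ba.length - 1 - bi) = ((sa.length + (ba.length - 1 - bi) : Nat) : Int) := by
    push_cast [Nat.cast_sub, h]
    omega
  rw [e, PySem.List.pyGetD_eq_getElem _ _ (by positivity) (by simp; omega)]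
  simp only [Int.toNat_natCast]
  rw [List.getElem_append_right (by omega)]
  rw [List.getElem_reverse]
  rw [List.getD_eq_getElem _ _ h]
  congr 1
  omega

-- B's sweep over a region of smalls pairs two per package
lemma bphase_small (x : Int) (sa ba : List Int) (hs : ∀ a ∈ sa, 2 * a ≤ x) :
    ∀ (k : Nat) (lo hi p : Int), 0 ≤ lo → lo - 1 ≤ hi → hi < (sa.length : Int) →
      (hi - lo + 1).toNat = k →
      solveAltLoop x (sa ++ ba) lo hi p = p + (hi - lo + 2) / 2 := by
  intro k
  induction k using Nat.strong_induction_on with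
  | _ k ih =>
    intro lo hi p h0 h1 h2 hk
    rw [solveAltLoop]
    by_cases hlh : lo ≤ hi
    · rw [dif_pos hlh]
      have hvlo := hs _ (List.getElem_mem (l := sa) (n := lo.toNat) (by omega))
      have hvhi := hs _ (List.getElem_mem (l := sa) (n := hi.toNat) (by omega))
      rw [getLow sa ba lo h0 (by omega), getLow sa ba hi (by omega) h2]
      rw [if_pos (by omega)]
      by_cases heq : lo = hi
      · subst heq
        rw [solveAltLoop, dif_neg (by omega)]
        omega
      · rw [ih (k - 2) (by omega) (lo + 1) (hi - 1) (p + 1) (by omega) (by omega) (by omega) (by omega)]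
        omega
    · rw [dif_neg hlh]
      omega

-- B's sweep with lo already in the big region counts one package per element
lemma bphase_big (x : Int) (sa ba : List Int) (hb : ∀ b ∈ ba, x < 2 * b) :
    ∀ (k : Nat) (hi p : Int), (sa.length : Int) - 1 ≤ hi →
      hi < (sa.length : Int) + (ba.length : Int) →
      (hi - sa.length + 1).toNat = k →
      solveAltLoop x (sa ++ ba) (sa.length : Int) hi p = p + (hi - sa.length + 1) := by
  intro k
  induction k with
  | zero =>
    intro hi p h1 h2 hk
    rw [solveAltLoop, dif_neg (by omega)]
    omega
  | succ k ih =>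
    intro hi p h1 h2 hk
    have hlh : (sa.length : Int) ≤ hi := by omega
    rw [solveAltLoop, dif_pos hlh]
    have e1 : PySem.List.pyGetD (sa ++ ba) (sa.length : Int) 0 = ba[0]'(by omega) := by
      rw [PySem.List.pyGetD_eq_getElem _ _ (by positivity) (by simp; omega)]
      simp only [Int.toNat_natCast]
      rw [List.getElem_append_right (by omega)]
      simp
    have e2 : PySem.List.pyGetD (sa ++ ba) hi 0 = ba[hi.toNat - sa.length]'(by omega) := by
      rw [PySem.List.pyGetD_eq_getElem _ _ (by omega) (by simp; omega)]
      rw [List.getElem_append_right (by omega)]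
    have hv1 := hb _ (List.getElem_mem (l := ba) (n := 0) (by omega))
    have hv2 := hb _ (List.getElem_mem (l := ba) (n := hi.toNat - sa.length) (by omega))
    rw [e1, e2, if_neg (by omega)]
    rw [ih (hi - 1) (p + 1) (by omega) (by omega) (by omega)]
    omega

-- main simulation: B's sweep state (lo = si, hi = n-1-bi) tracks A's matching loop
lemma sim (x : Int) (sa bd : List Int)
    (hs : ∀ a ∈ sa, 2 * a ≤ x) (hb : ∀ b ∈ bd, x < 2 * b) :
    ∀ (k : Nat) (bi si : Nat) (p pih : Int), bi ≤ bd.length → si ≤ sa.length →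
      bd.length - bi = k →
      solveAltLoop x (sa ++ bd.reverse) (si : Int)
          ((sa.length : Int) + (bd.length : Int) - 1 - (bi : Int)) p
        = p + ((bd.length : Int) - (bi : Int))
            + ((sa.length : Int) - (si : Int) - (solveLoop x bd sa pih bi si - pih) + 1) / 2 := by
  intro k
  induction k with
  | zero =>
    intro bi si p pih hbi hsi hk
    have hbe : bi = bd.length := by omega
    subst hbe
    rw [solveLoop, dif_neg (by omega)]
    have e : (sa.length : Int) + (bd.length : Int) - 1 - (bd.length : Int) = (sa.length : Int) - 1 + 0 := by ring
    rw [e]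
    have := bphase_small x sa bd.reverse hs ((sa.length : Int) - 1 + 0 - si + 1).toNat
      (si : Int) ((sa.length : Int) - 1 + 0) p (by positivity) (by omega) (by omega) rfl
    rw [this]
    omega
  | succ k ih =>
    intro bi si p pih hbi hsi hk
    have hbl : bi < bd.length := by omega
    by_cases hsl : si < sa.length
    · -- both loops take one matching step, on the same two values
      rw [solveLoop, dif_pos ⟨hbl, hsl⟩]
      rw [solveAltLoop, dif_pos (by omega)]
      rw [getS_small sa bd.reverse si hsl, getS_big sa bd bi hbl]
      rw [Int.add_comm (sa.getD si 0)]
      have e1 : ((si : Nat) : Int) + 1 = (((si + 1 : Nat)) : Int) := by push_cast; ring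
      have e2 : (sa.length : Int) + (bd.length : Int) - 1 - (bi : Int) - 1
          = (sa.length : Int) + (bd.length : Int) - 1 - ((bi + 1 : Nat) : Int) := by push_cast; ring
      by_cases hc : bd.getD bi 0 + sa.getD si 0 ≤ x
      · rw [if_pos hc, if_pos hc, e1, e2]
        rw [ih (bi + 1) (si + 1) (p + 1) (pih + 1) (by omega) (by omega) (by omega)]
        omega
      · rw [if_neg hc, if_neg hc, e2]
        rw [ih (bi + 1) si (p + 1) pih (by omega) (by omega) (by omega)]
        push_cast
        omega
    · -- si = |sa| : A's loop stops; B sweeps the remaining bigs one by one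
      have hse : si = sa.length := by omega
      rw [solveLoop, dif_neg (by omega)]
      rw [hse]
      have := bphase_big x sa bd.reverse (by simpa using hb)
        (((sa.length : Int) + (bd.length : Int) - 1 - bi - sa.length + 1).toNat)
        ((sa.length : Int) + (bd.length : Int) - 1 - (bi : Int)) p
        (by omega) (by simp only [List.length_reverse]; omega) rfl
      rw [this]
      omega

-- the one ascending sort is the sorted smalls followed by the reversed descending bigs
lemma sorted_files_split (x : Int) (files : List Int) :
    PySem.List.sorted files (fun v => v)
      = PySem.List.sorted (files.filter (fun f => !decide (PySem.Int.floordiv x 2 < f))) (fun v => v)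
        ++ (PySem.List.sorted (files.filter (fun f => decide (PySem.Int.floordiv x 2 < f))) (fun v => v) true).reverse := by
  apply PySem.List.sorted_id_eq_of_perm_of_pairwise
  · apply List.Perm.trans (List.Perm.append
      (PySem.List.sorted_perm _ _ _)
      ((List.reverse_perm _).trans (PySem.List.sorted_perm _ _ _)))
    exact (List.perm_append_comm).trans (List.filter_append_perm _ files)
  · rw [List.pairwise_append]
    refine ⟨by simpa using PySem.List.sorted_pairwise _ (fun v => v), ?_, ?_⟩
    · rw [List.pairwise_reverse]
      simpa using PySem.List.sorted_pairwise_rev _ (fun v => v)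
    · intro a ha b hb
      rw [PySem.List.mem_sorted, List.mem_filter] at ha
      rw [List.mem_reverse, PySem.List.mem_sorted, List.mem_filter] at hb
      have h1 : ¬ PySem.Int.floordiv x 2 < a := by simpa using ha.2
      have h2 : PySem.Int.floordiv x 2 < b := by simpa using hb.2
      omega

-- ===== VERDICT (by name: the statement is the Claim_ definition above) =====
theorem solve_spec : Claim_equal_solve := by
  intro x files _
  unfold Spec_solve solve solve_alt solvePart
  rw [solvePart_go]
  simp only [List.nil_append]
  have hq : PySem.Int.floordiv x 2 = x / 2 := PySem.Int.floordiv_eq_ediv_of_pos (by norm_num)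
  have hs : ∀ a ∈ PySem.List.sorted (files.filter (fun f => !decide (PySem.Int.floordiv x 2 < f))) (fun v => v), 2 * a ≤ x := by
    intro a ha
    rw [PySem.List.mem_sorted, List.mem_filter] at ha
    have h1 : ¬ PySem.Int.floordiv x 2 < a := by simpa using ha.2
    omega
  have hb : ∀ b ∈ PySem.List.sorted (files.filter (fun f => decide (PySem.Int.floordiv x 2 < f))) (fun v => v) true, x < 2 * b := by
    intro b hbm
    rw [PySem.List.mem_sorted, List.mem_filter] at hbm
    have h1 : PySem.Int.floordiv x 2 < b := by simpa using hbm.2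
    omega
  rw [sorted_files_split x files]
  set sa := PySem.List.sorted (files.filter (fun f => !decide (PySem.Int.floordiv x 2 < f))) (fun v => v) with hsa
  set bd := PySem.List.sorted (files.filter (fun f => decide (PySem.Int.floordiv x 2 < f))) (fun v => v) true with hbd
  have e0 : PySem.List.len (sa ++ bd.reverse) - 1
      = (sa.length : Int) + (bd.length : Int) - 1 - 0 := by
    rw [PySem.List.len_eq]
    push_cast [List.length_append, List.length_reverse]
    ring
  have key := sim x sa bd hs hb bd.length 0 0 0 0 (by omega) (by omega) (by omega)
  rw [Nat.cast_zero] at key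
  rw [e0, key]
  rw [PySem.List.len_eq, PySem.List.len_eq, PySem.Int.floordiv_eq_ediv_of_pos (by norm_num)]
  omega
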